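-- pv_equiv track=rewrite | github.com/binwei0329/GraduateDesign | Model/Statistics.py | extract_labels_helper
-- ===== SOURCE A (Python) =====
-- def extract_labels_helper(label_list, tag_dic):
--     """
--     This method extracts labels from predictions of the model, and
--     this method is aimed for situations like two or more predicted tags neighboring
--     each other, like "B-ORG I-ORG B-PER I-PER".
--     :param label_list: predicted labels
--     :param tag_dic: tag dictionary
--     :return: extracted labels
--     """
--     label_ls = []
--     num = (len(tag_dic) - 1) // 2
--     for label in label_list:
--         index = []
--         for l in range(len(label)):
--             if label[l] < num:
--                 index.append(l)
--         if len(index) == 1: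
--             label_ls.append(label)
--         elif len(index) == 2:
--             label_ls.append(label[:index[1]])
--             label_ls.append(label[index[1]:])
--         elif len(index) == 3:
--             label_ls.append(label[:index[1]])
--             label_ls.append(label[index[1]:index[2]])
--             label_ls.append(label[index[2]:])
--         elif len(index) == 4:
--             label_ls.append(label[:index[1]])
--             label_ls.append(label[index[1]:index[2]])
--             label_ls.append(label[index[2]:index[3]])
--             label_ls.append(label[index[3]:])
--
--     return label_ls
-- ===== SOURCE B (Python) =====
-- def extract_labels_helper(label_list, tag_dic):
--     """Single reverse pass per label: group tokens into segments directly
--     (each 'begin' tag starts a segment) instead of computing boundary index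
--     lists and slicing four hardcoded ways."""
--     label_ls = []
--     num = (len(tag_dic) - 1) // 2
--     for label in label_list:
--         segments = []
--         cur = []
--         for t in reversed(label):
--             cur = [t] + cur
--             if t < num:
--                 segments = [cur] + segments
--                 cur = []
--         if segments and len(segments) <= 4:
--             segments[0] = cur + segments[0]
--             label_ls.extend(segments)
--     return label_ls
-- ===== Notes on version B (the rewrite author's own statement) =====
-- stated objective: alternative
-- what changed: Instead of computing a boundary-index list and slicing the label four hardcoded ways, B makes a single reverse pass per label that groups tokens into segments directly (each begin tag starts a segment), merges the leading remainder into the first segment, and keeps the result when there are 1-4 segments.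
import Mathlib
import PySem

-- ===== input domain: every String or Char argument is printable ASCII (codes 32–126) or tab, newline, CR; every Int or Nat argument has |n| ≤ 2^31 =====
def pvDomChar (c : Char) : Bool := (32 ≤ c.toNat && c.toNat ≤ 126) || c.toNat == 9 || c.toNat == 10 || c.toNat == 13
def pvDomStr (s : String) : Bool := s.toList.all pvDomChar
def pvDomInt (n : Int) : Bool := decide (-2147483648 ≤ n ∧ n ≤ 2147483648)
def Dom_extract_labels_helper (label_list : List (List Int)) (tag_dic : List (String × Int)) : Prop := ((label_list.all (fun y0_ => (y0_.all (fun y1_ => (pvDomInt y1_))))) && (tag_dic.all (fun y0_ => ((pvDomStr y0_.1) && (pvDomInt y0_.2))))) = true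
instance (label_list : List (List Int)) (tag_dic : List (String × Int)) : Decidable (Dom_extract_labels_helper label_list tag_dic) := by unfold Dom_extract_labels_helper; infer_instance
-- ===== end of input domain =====

-- B replaces A's boundary-index-list-plus-four-hardcoded-slices scheme by one reverse
-- grouping pass per label that builds the segments directly (alternative decomposition).

-- ===== PORT A =====
def extract_labels_helper (label_list : List (List Int)) (tag_dic : List (String × Int)) : List (List Int) :=
  let num := PySem.Int.floordiv ((tag_dic.length : Int) - 1) 2
  label_list.foldl (fun label_ls label =>
    -- for l in range(len(label)): if label[l] < num: index.append(l)  (l always in range, so pyGetD is exact)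
    let index := (PySem.List.pyRange 0 (label.length : Int) 1).foldl
      (fun idx l => if PySem.List.pyGetD label l 0 < num then idx ++ [l] else idx) []
    -- the if/elif chain on len(index), indexing index[1..3] under each guard
    match index with
    | [_] => label_ls ++ [label]
    | [_, i1] => label_ls ++ [PySem.List.slice label none (some i1),
                              PySem.List.slice label (some i1) none]
    | [_, i1, i2] => label_ls ++ [PySem.List.slice label none (some i1),
                                  PySem.List.slice label (some i1) (some i2),
                                  PySem.List.slice label (some i2) none]
    | [_, i1, i2, i3] => label_ls ++ [PySem.List.slice label none (some i1),
                                      PySem.List.slice label (some i1) (some i2),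
                                      PySem.List.slice label (some i2) (some i3),
                                      PySem.List.slice label (some i3) none]
    | _ => label_ls) []

-- ===== PORT B =====
def extract_labels_helper_alt (label_list : List (List Int)) (tag_dic : List (String × Int)) : List (List Int) :=
  let num := PySem.Int.floordiv ((tag_dic.length : Int) - 1) 2
  label_list.foldl (fun label_ls label =>
    -- for t in reversed(label): cur = [t] + cur; if t < num: segments = [cur] + segments; cur = []
    let st := label.reverse.foldl
      (fun (s : List (List Int) × List Int) t =>
        let cur' := [t] ++ s.2
        if t < num then ([cur'] ++ s.1, ([] : List Int)) else (s.1, cur')) ([], [])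
    -- if segments and len(segments) <= 4: segments[0] = cur + segments[0]; label_ls.extend(segments)
    match st with
    | ([], _) => label_ls
    | (s0 :: rest, cur) =>
      if (s0 :: rest).length ≤ 4 then label_ls ++ ((cur ++ s0) :: rest) else label_ls) []

-- ===== PRECONDITION & SPEC =====
def Spec_extract_labels_helper (label_list : List (List Int)) (tag_dic : List (String × Int)) (out : List (List Int)) : Prop := out = extract_labels_helper_alt label_list tag_dic
instance (label_list : List (List Int)) (tag_dic : List (String × Int)) (out : List (List Int)) : Decidable (Spec_extract_labels_helper label_list tag_dic out) := by unfold Spec_extract_labels_helper; infer_instance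

-- ===== CLAIM (what is proved, stated in full; the proofs are below) =====
def Claim_equal_extract_labels_helper : Prop := ∀ (label_list : List (List Int)) (tag_dic : List (String × Int)), Dom_extract_labels_helper label_list tag_dic → Spec_extract_labels_helper label_list tag_dic (extract_labels_helper label_list tag_dic)

-- ===== LEMMAS AND PROOFS =====

-- the list of boundary positions (label[i] < num), positions counted from k
def pvBnds (num k : Int) : List Int → List Int
  | [] => []
  | t :: r => if t < num then k :: pvBnds num (k + 1) r else pvBnds num (k + 1) r

-- the functional form of B's reverse accumulation (what the foldr unfolds to)
def pvScan (num : Int) : List Int → List (List Int) × List Int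
  | [] => ([], [])
  | t :: r =>
    let s := pvScan num r
    let cur' := t :: s.2
    if t < num then (cur' :: s.1, []) else (s.1, cur')

-- each segment runs from its boundary to the next boundary (or the end)
def pvSegRel (l : List Int) : List Int → List (List Int) → Prop
  | j :: j' :: js, s :: ss => s = PySem.List.slice l (some j) (some j') ∧ pvSegRel l (j' :: js) ss
  | [j], [s] => s = PySem.List.slice l (some j) none
  | [], [] => True
  | _, _ => False

def pvScanRel (num : Int) (l : List Int) : Prop :=
  match pvBnds num 0 l, pvScan num l with
  | [], ([], cur) => cur = l
  | j :: js, (s :: ss, cur) => cur = PySem.List.slice l none (some j) ∧ pvSegRel l (j :: js) (s :: ss)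
  | _, _ => False

theorem pv_fold_eq_scan (num : Int) (l : List Int) :
    l.reverse.foldl
      (fun (s : List (List Int) × List Int) t =>
        let cur' := [t] ++ s.2
        if t < num then ([cur'] ++ s.1, ([] : List Int)) else (s.1, cur')) ([], [])
    = pvScan num l := by
  rw [List.foldl_reverse]
  induction l with
  | nil => rfl
  | cons t r ih => simp only [List.foldr_cons, ih, pvScan]; rfl

theorem pv_idx_eq (num : Int) (label : List Int) :
    (PySem.List.pyRange 0 (label.length : Int) 1).foldl
      (fun idx l => if PySem.List.pyGetD label l 0 < num then idx ++ [l] else idx) []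
    = (PySem.List.enumerate label 0).filterMap
      (fun it => if it.2 < num then some it.1 else none) := by
  have hguard : ∀ (l : List Int),
      l.filterMap (fun x => if PySem.List.pyGetD label x 0 < num then some x else none)
      = l.filter (fun x => decide (PySem.List.pyGetD label x 0 < num)) := by
    intro l
    induction l with
    | nil => rfl
    | cons x xs ih => by_cases h : PySem.List.pyGetD label x 0 < num <;> simp [h, ih]
  rw [PySem.List.foldl_append_ite_eq_filter,
      PySem.List.enumerate_eq_map_pyRange label (0 : Int), List.filterMap_map]
  simp only [Function.comp_def, List.nil_append, PySem.List.len]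
  rw [hguard]

theorem pv_enum_eq_bnds (num : Int) (l : List Int) : ∀ (k : Int),
    (PySem.List.enumerate l k).filterMap
      (fun it => if it.2 < num then some it.1 else none) = pvBnds num k l := by
  induction l with
  | nil => intro k; rfl
  | cons t r ih =>
    intro k
    rw [PySem.List.enumerate_cons]
    by_cases h : t < num <;> simp [h, ih, pvBnds]

theorem pv_mem_bnds_le (num : Int) (l : List Int) : ∀ (k x : Int), x ∈ pvBnds num k l → k ≤ x := by
  induction l with
  | nil => intro k x h; simp [pvBnds] at h
  | cons t r ih =>
    intro k x h
    by_cases ht : t < num <;> simp [pvBnds, ht] at h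
    · rcases h with h | h
      · omega
      · have := ih (k + 1) x h; omega
    · have := ih (k + 1) x h; omega

theorem pv_bnds_shift (num : Int) (l : List Int) : ∀ (k : Int),
    pvBnds num (k + 1) l = (pvBnds num k l).map (· + 1) := by
  induction l with
  | nil => intro k; rfl
  | cons t r ih =>
    intro k
    by_cases ht : t < num <;> simp [pvBnds, ht, ih (k + 1)]

theorem pv_slice_to_shift (t : Int) (r : List Int) (j : Int) (hj : 0 ≤ j) :
    PySem.List.slice (t :: r) none (some (j + 1)) = t :: PySem.List.slice r none (some j) := by
  rw [PySem.List.slice_to _ (by omega), PySem.List.slice_to _ hj]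
  have : (j + 1).toNat = j.toNat + 1 := by omega
  rw [this, List.take_succ_cons]

theorem pv_slice_from_shift (t : Int) (r : List Int) (j : Int) (hj : 0 ≤ j) :
    PySem.List.slice (t :: r) (some (j + 1)) none = PySem.List.slice r (some j) none := by
  rw [PySem.List.slice_from _ (by omega), PySem.List.slice_from _ hj]
  have : (j + 1).toNat = j.toNat + 1 := by omega
  rw [this, List.drop_succ_cons]

theorem pv_slice_both_shift (t : Int) (r : List Int) (j j' : Int) (hj : 0 ≤ j) (hj' : 0 ≤ j') :
    PySem.List.slice (t :: r) (some (j + 1)) (some (j' + 1)) = PySem.List.slice r (some j) (some j') := by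
  rw [PySem.List.slice_toNat _ (by omega) (by omega), PySem.List.slice_toNat _ hj hj']
  have h1 : (j + 1).toNat = j.toNat + 1 := by omega
  have h2 : (j' + 1).toNat = j'.toNat + 1 := by omega
  rw [h1, h2, List.drop_succ_cons]
  congr 1
  omega

theorem pv_segrel_shift (t : Int) (r : List Int) :
    ∀ (js : List Int) (segs : List (List Int)), (∀ x ∈ js, 0 ≤ x) →
    pvSegRel r js segs → pvSegRel (t :: r) (js.map (· + 1)) segs := by
  intro js
  induction js with
  | nil => intro segs _ h; cases segs with
    | nil => trivial
    | cons s ss => exact absurd h (by simp [pvSegRel])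
  | cons j js' ih =>
    intro segs hnn h
    cases segs with
    | nil => cases js' <;> exact absurd h (by simp [pvSegRel])
    | cons s ss =>
      cases js' with
      | nil =>
        cases ss with
        | nil =>
          simp only [pvSegRel] at h
          simp only [List.map, pvSegRel]
          rw [h, pv_slice_from_shift t r j (hnn j (by simp))]
        | cons _ _ => exact absurd h (by simp [pvSegRel])
      | cons j' js'' =>
        simp only [pvSegRel] at h
        simp only [List.map, pvSegRel]
        refine ⟨?_, ih ss (fun x hx => hnn x (List.mem_cons_of_mem _ hx)) h.2⟩
        rw [h.1, pv_slice_both_shift t r j j' (hnn j (by simp)) (hnn j' (by simp))]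

theorem pv_main (num : Int) (l : List Int) : pvScanRel num l := by
  induction l with
  | nil => simp [pvScanRel, pvBnds, pvScan]
  | cons t r ih =>
    have hnn : ∀ x ∈ pvBnds num 0 r, (0 : Int) ≤ x := fun x hx => pv_mem_bnds_le num r 0 x hx
    unfold pvScanRel at ih ⊢
    by_cases ht : t < num
    · -- t is a boundary: new segment starts
      simp only [pvBnds, pvScan, ht, if_true, pv_bnds_shift num r 0]
      cases hb : pvBnds num 0 r with
      | nil =>
        rw [hb] at ih
        cases hs : pvScan num r with
        | mk segs cur =>
          rw [hs] at ih
          cases segs with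
          | nil =>
            simp only at ih
            simp only [List.map_nil]
            refine ⟨by simp [PySem.List.slice_to], ?_⟩
            simp only [pvSegRel, ih]
            rw [PySem.List.slice_from _ le_rfl]
            rfl
          | cons s ss => exact absurd ih (by simp)
      | cons j js =>
        rw [hb] at ih
        cases hs : pvScan num r with
        | mk segs cur =>
          rw [hs] at ih
          cases segs with
          | nil => exact absurd ih (by simp)
          | cons s ss =>
            simp only at ih
            simp only [List.map]
            refine ⟨by simp [PySem.List.slice_to], ?_⟩
            have hj0 : (0 : Int) ≤ j := hnn j (by rw [hb]; simp)
            simp only [pvSegRel]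
            constructor
            · rw [PySem.List.slice_toNat _ le_rfl (by omega)]
              have : (j + 1).toNat = j.toNat + 1 := by omega
              simp only [this, Int.toNat_zero, List.drop_zero, Nat.sub_zero, List.take_succ_cons]
              rw [ih.1, PySem.List.slice_to _ hj0]
            · exact pv_segrel_shift t r (j :: js) (s :: ss)
                (fun x hx => hnn x (by rw [hb]; exact hx)) ih.2
    · -- t is not a boundary: it joins the pending prefix
      simp only [pvBnds, pvScan, ht, if_false, pv_bnds_shift num r 0]
      cases hb : pvBnds num 0 r with
      | nil =>
        rw [hb] at ih
        cases hs : pvScan num r with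
        | mk segs cur =>
          rw [hs] at ih
          cases segs with
          | nil => simp only at ih; simp only [List.map_nil, ih]
          | cons s ss => exact absurd ih (by simp)
      | cons j js =>
        rw [hb] at ih
        cases hs : pvScan num r with
        | mk segs cur =>
          rw [hs] at ih
          cases segs with
          | nil => exact absurd ih (by simp)
          | cons s ss =>
            simp only at ih
            simp only [List.map]
            have hj0 : (0 : Int) ≤ j := hnn j (by rw [hb]; simp)
            refine ⟨?_, pv_segrel_shift t r (j :: js) (s :: ss)
                (fun x hx => hnn x (by rw [hb]; exact hx)) ih.2⟩
            rw [ih.1, pv_slice_to_shift t r j hj0]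

theorem pv_segrel_len {l : List Int} : ∀ {js : List Int} {segs : List (List Int)},
    pvSegRel l js segs → js.length = segs.length := by
  intro js
  induction js with
  | nil => intro segs h; cases segs with
    | nil => rfl
    | cons s ss => exact absurd h (by simp [pvSegRel])
  | cons j js' ih =>
    intro segs h
    cases segs with
    | nil => cases js' <;> exact absurd h (by simp [pvSegRel])
    | cons s ss =>
      cases js' with
      | nil =>
        cases ss with
        | nil => rfl
        | cons _ _ => exact absurd h (by simp [pvSegRel])
      | cons j' js'' =>
        simp only [pvSegRel] at h
        simpa using ih h.2

-- merging the pending prefix into the first segment gives A's first slice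
theorem pv_take_merge (l : List Int) (j j' : Int) (hj : 0 ≤ j) (hjj' : j ≤ j') :
    PySem.List.slice l none (some j) ++ PySem.List.slice l (some j) (some j')
    = PySem.List.slice l none (some j') := by
  rw [PySem.List.slice_to _ hj, PySem.List.slice_to _ (by omega),
      PySem.List.slice_toNat _ hj (by omega)]
  have h1 : j'.toNat = j.toNat + (j'.toNat - j.toNat) := by omega
  rw [h1, List.take_add]
  have h2 : j.toNat + (j'.toNat - j.toNat) - j.toNat = j'.toNat - j.toNat := by omega
  rw [h2]

theorem pv_take_drop_merge (l : List Int) (j : Int) (hj : 0 ≤ j) :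
    PySem.List.slice l none (some j) ++ PySem.List.slice l (some j) none = l := by
  rw [PySem.List.slice_to _ hj, PySem.List.slice_from _ hj, List.take_append_drop]

theorem pv_bnds_pairwise (num : Int) (l : List Int) : ∀ (k : Int),
    (pvBnds num k l).Pairwise (· < ·) := by
  induction l with
  | nil => intro k; simp [pvBnds]
  | cons t r ih =>
    intro k
    by_cases ht : t < num <;> simp only [pvBnds, ht, if_true, if_false]
    · exact List.Pairwise.cons (fun x hx => by have := pv_mem_bnds_le num r (k+1) x hx; omega) (ih (k+1))
    · exact ih (k + 1)

-- the per-label step functions of the two ports agree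
theorem pv_step_eq (num : Int) (label : List Int) (acc : List (List Int)) :
    (let index := (PySem.List.pyRange 0 (label.length : Int) 1).foldl
        (fun idx l => if PySem.List.pyGetD label l 0 < num then idx ++ [l] else idx) []
     match index with
     | [_] => acc ++ [label]
     | [_, i1] => acc ++ [PySem.List.slice label none (some i1),
                          PySem.List.slice label (some i1) none]
     | [_, i1, i2] => acc ++ [PySem.List.slice label none (some i1),
                              PySem.List.slice label (some i1) (some i2),
                              PySem.List.slice label (some i2) none]
     | [_, i1, i2, i3] => acc ++ [PySem.List.slice label none (some i1),
                                  PySem.List.slice label (some i1) (some i2),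
                                  PySem.List.slice label (some i2) (some i3),
                                  PySem.List.slice label (some i3) none]
     | _ => acc)
    =
    (let st := label.reverse.foldl
        (fun (s : List (List Int) × List Int) t =>
          let cur' := [t] ++ s.2
          if t < num then ([cur'] ++ s.1, ([] : List Int)) else (s.1, cur')) ([], [])
     match st with
     | ([], _) => acc
     | (s0 :: rest, cur) =>
       if (s0 :: rest).length ≤ 4 then acc ++ ((cur ++ s0) :: rest) else acc) := by
  rw [pv_idx_eq, pv_enum_eq_bnds, pv_fold_eq_scan]
  have hrel := pv_main num label
  have hpw := pv_bnds_pairwise num label 0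
  have hnn : ∀ x ∈ pvBnds num 0 label, (0 : Int) ≤ x :=
    fun x hx => pv_mem_bnds_le num label 0 x hx
  unfold pvScanRel at hrel
  cases hb : pvBnds num 0 label with
  | nil =>
    rw [hb] at hrel
    cases hs : pvScan num label with
    | mk segs cur =>
      rw [hs] at hrel
      cases segs with
      | nil => simp
      | cons s ss => exact absurd hrel (by simp)
  | cons j js =>
    rw [hb] at hrel hpw
    cases hs : pvScan num label with
    | mk segs cur =>
      rw [hs] at hrel
      cases segs with
      | nil => exact absurd hrel (by simp)
      | cons s ss =>
        simp only at hrel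
        obtain ⟨hcur, hseg⟩ := hrel
        have hj0 : (0 : Int) ≤ j := hnn j (by rw [hb]; simp)
        have hlen : js.length = ss.length := by
          have := pv_segrel_len (l := label) hseg
          simpa using this
        -- case on the number of boundaries
        match js, ss, hseg, hlen with
        | [], [], hseg, _ =>
          simp only [pvSegRel] at hseg
          simp only [List.length_singleton, if_pos (by omega : 1 ≤ 4)]
          rw [hcur, hseg, pv_take_drop_merge label j hj0]
        | [j1], [s1], hseg, _ =>
          simp only [pvSegRel] at hseg
          have hjj1 : j < j1 := by rcases List.pairwise_cons.mp hpw with ⟨h1, _⟩; exact h1 j1 (by simp)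
          simp only [List.length_cons, List.length_nil, if_pos (by omega : 2 ≤ 4)]
          rw [hcur, hseg.1, hseg.2, pv_take_merge label j j1 hj0 (le_of_lt hjj1)]
        | [j1, j2], [s1, s2], hseg, _ =>
          simp only [pvSegRel] at hseg
          have hjj1 : j < j1 := by rcases List.pairwise_cons.mp hpw with ⟨h1, _⟩; exact h1 j1 (by simp)
          simp only [List.length_cons, List.length_nil, if_pos (by omega : 3 ≤ 4)]
          rw [hcur, hseg.1, hseg.2.1, hseg.2.2, pv_take_merge label j j1 hj0 (le_of_lt hjj1)]
        | [j1, j2, j3], [s1, s2, s3], hseg, _ =>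
          simp only [pvSegRel] at hseg
          have hjj1 : j < j1 := by rcases List.pairwise_cons.mp hpw with ⟨h1, _⟩; exact h1 j1 (by simp)
          simp only [List.length_cons, List.length_nil, if_pos (by omega : 4 ≤ 4)]
          rw [hcur, hseg.1, hseg.2.1, hseg.2.2.1, hseg.2.2.2,
              pv_take_merge label j j1 hj0 (le_of_lt hjj1)]
        | j1 :: j2 :: j3 :: j4 :: jrest, s1 :: s2 :: s3 :: s4 :: srest, _, hlen =>
          simp only [List.length_cons]
          rw [if_neg (by omega)]

-- ===== VERDICT (by name: the statement is the Claim_ definition above) =====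
theorem extract_labels_helper_spec : Claim_equal_extract_labels_helper := by
  intro label_list tag_dic _
  unfold Spec_extract_labels_helper extract_labels_helper extract_labels_helper_alt
  dsimp only []
  congr 1
  funext acc label
  exact pv_step_eq _ label acc
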